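-- pv_equiv track=rewrite | github.com/Jyury11/Competitive-programming-py | app/abc122_b.py | check_len_actg
-- ===== SOURCE A (Python) =====
-- def check_len_actg(s: str) -> int:
--     max_len = 0
--     itr_len = 0
--     for i in s:
--         if i == 'A' or i == 'C' or i == 'T' or i == 'G':
--             itr_len += 1
--         else:
--             if max_len < itr_len:
--                 max_len = itr_len
--             itr_len = 0
--     if max_len < itr_len:
--         return itr_len
--     return max_len
-- ===== SOURCE B (Python) =====
-- def check_len_actg(s: str) -> int:
--     # blank out non-bases, split into maximal ACGT runs, take the longest
--     cleaned = ''.join(c if c in 'ACGT' else ' ' for c in s)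
--     return max((len(r) for r in cleaned.split()), default=0)
-- ===== Notes on version B (the rewrite author's own statement) =====
-- stated objective: simpler
-- what changed: B replaces A's online scan with two counters by a two-phase extract-then-reduce: blank out non-ACGT characters, split the string into maximal runs, and take the maximum run length (0 when there are no runs).
import Mathlib
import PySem

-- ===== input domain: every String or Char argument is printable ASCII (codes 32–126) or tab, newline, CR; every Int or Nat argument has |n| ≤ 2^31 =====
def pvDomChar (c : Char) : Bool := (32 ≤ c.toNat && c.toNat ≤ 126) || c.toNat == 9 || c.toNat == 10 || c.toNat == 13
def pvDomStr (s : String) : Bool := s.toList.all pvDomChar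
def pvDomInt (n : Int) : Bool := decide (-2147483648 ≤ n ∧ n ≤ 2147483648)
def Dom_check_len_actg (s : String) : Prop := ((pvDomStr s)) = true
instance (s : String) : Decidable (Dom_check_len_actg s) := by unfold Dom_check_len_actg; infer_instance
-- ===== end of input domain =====

-- B replaces A's single online pass (two running counters) by a two-phase
-- extract-then-reduce: blank out non-ACGT chars, split into maximal runs, take the max length.

-- ===== PORT A =====
def check_len_actg (s : String) : Int :=
  let r := s.toList.foldl
    (fun (st : Int × Int) (i : Char) =>
      if i = 'A' ∨ i = 'C' ∨ i = 'T' ∨ i = 'G' then (st.1, st.2 + 1)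
      else ((if st.1 < st.2 then st.2 else st.1), (0 : Int)))
    ((0 : Int), (0 : Int))
  if r.1 < r.2 then r.2 else r.1

-- ===== PORT B =====
-- hand port of Python str.split() (split on whitespace runs, drop empties); exact here
-- because the cleaned list contains only ACGT letters and ' '.
def pvWSplit : List Char → List (List Char)
  | [] => []
  | c :: t =>
    if c = ' ' then pvWSplit t
    else (c :: t.takeWhile (· ≠ ' ')) :: pvWSplit (t.dropWhile (· ≠ ' '))
termination_by l => l.length
decreasing_by
  · simp
  · exact Nat.lt_succ_of_le (t.length_dropWhile_le _)

def check_len_actg_alt (s : String) : Int :=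
  let cleaned := s.toList.map (fun c => if c = 'A' ∨ c = 'C' ∨ c = 'G' ∨ c = 'T' then c else ' ')
  -- max(gen, default=0): every run is nonempty, so folding max from 0 is exact
  ((pvWSplit cleaned).map (fun r => (r.length : Int))).foldl max 0

-- ===== PRECONDITION & SPEC =====
def Spec_check_len_actg (s : String) (out : Int) : Prop := out = check_len_actg_alt s
instance (s : String) (out : Int) : Decidable (Spec_check_len_actg s out) := by unfold Spec_check_len_actg; infer_instance

-- ===== CLAIM (what is proved, stated in full; the proofs are below) =====
def Claim_equal_check_len_actg : Prop := ∀ (s : String), Dom_check_len_actg s → Spec_check_len_actg s (check_len_actg s)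

-- ===== LEMMAS AND PROOFS =====

def pvValid (c : Char) : Bool := c = 'A' ∨ c = 'C' ∨ c = 'T' ∨ c = 'G'

def pvStepA (st : Int × Int) (i : Char) : Int × Int :=
  if i = 'A' ∨ i = 'C' ∨ i = 'T' ∨ i = 'G' then (st.1, st.2 + 1)
  else ((if st.1 < st.2 then st.2 else st.1), (0 : Int))

def pvLead (l : List Char) : Int := ((l.takeWhile pvValid).length : Int)

def pvRest : List Char → Int
  | [] => 0
  | c :: t => if pvValid c then pvRest t else max (pvLead t) (pvRest t)

theorem pvLead_nonneg (l : List Char) : 0 ≤ pvLead l := by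
  simp [pvLead]

theorem pvRest_nonneg (l : List Char) : 0 ≤ pvRest l := by
  induction l with
  | nil => simp [pvRest]
  | cons c t ih =>
    simp only [pvRest]
    split
    · exact ih
    · exact le_max_of_le_right ih

theorem pvLead_cons_valid (c : Char) (t : List Char) (h : pvValid c = true) :
    pvLead (c :: t) = 1 + pvLead t := by
  simp [pvLead, List.takeWhile_cons_of_pos h]; omega

theorem pvLead_cons_invalid (c : Char) (t : List Char) (h : pvValid c = false) :
    pvLead (c :: t) = 0 := by
  simp [pvLead, h]

-- A's loop characterised: final "max of the two counters" value
theorem foldlA_eq (l : List Char) : ∀ (m k : Int), 0 ≤ k →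
    max (l.foldl pvStepA (m, k)).1 (l.foldl pvStepA (m, k)).2
      = max m (max (k + pvLead l) (pvRest l)) := by
  induction l with
  | nil =>
    intro m k hk
    simp [pvLead, pvRest, max_eq_left hk]
  | cons c t ih =>
    intro m k hk
    by_cases hv : pvValid c = true
    · have hv' : c = 'A' ∨ c = 'C' ∨ c = 'T' ∨ c = 'G' := by
        simpa [pvValid] using hv
      rw [List.foldl_cons, show pvStepA (m, k) c = (m, k + 1) from by
        simp [pvStepA, hv']]
      rw [ih m (k + 1) (by omega), pvLead_cons_valid c t hv]
      simp only [pvRest, hv, if_pos]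
      omega
    · have hv'' : pvValid c = false := by simpa using hv
      have hv' : ¬ (c = 'A' ∨ c = 'C' ∨ c = 'T' ∨ c = 'G') := by
        simpa [pvValid] using hv''
      rw [List.foldl_cons, show pvStepA (m, k) c = (max m k, 0) from by
        simp only [pvStepA, if_neg hv']
        split_ifs with h <;> simp <;> omega]
      rw [ih (max m k) 0 le_rfl, pvLead_cons_invalid c t hv'']
      simp only [pvRest, hv'', Bool.false_eq_true, if_false]
      have hl := pvLead_nonneg t
      have hr := pvRest_nonneg t
      omega

def pvClean (l : List Char) : List Char :=
  l.map (fun c => if c = 'A' ∨ c = 'C' ∨ c = 'G' ∨ c = 'T' then c else ' ')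

theorem pvClean_cons (c : Char) (t : List Char) :
    pvClean (c :: t) = (if pvValid c = true then c else ' ') :: pvClean t := by
  simp only [pvClean, List.map_cons]
  by_cases hv : pvValid c = true
  · have h : c = 'A' ∨ c = 'C' ∨ c = 'G' ∨ c = 'T' := by
      simp [pvValid] at hv; tauto
    rw [if_pos h, if_pos hv]
  · have h : ¬ (c = 'A' ∨ c = 'C' ∨ c = 'G' ∨ c = 'T') := by
      simp [pvValid] at hv; tauto
    rw [if_neg h, if_neg hv]

theorem pvValid_ne_space (c : Char) (h : pvValid c = true) : c ≠ ' ' := by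
  simp [pvValid] at h
  rcases h with h | h | h | h <;> simp [h]

def pvFMax (l : List Int) : Int := l.foldl max 0

theorem pvFMax_shift (l : List Int) : ∀ a b : Int,
    l.foldl max (max a b) = max a (l.foldl max b) := by
  induction l with
  | nil => intro a b; simp
  | cons x t ih =>
    intro a b
    simp only [List.foldl_cons]
    rw [max_assoc a b x, ih]

theorem pvFMax_cons (a : Int) (l : List Int) : pvFMax (a :: l) = max a (pvFMax l) := by
  simp only [pvFMax, List.foldl_cons]
  rw [max_comm 0 a, pvFMax_shift]

-- takeWhile/dropWhile over the cleaned list correspond to takeWhile/dropWhile pvValid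
theorem clean_takeWhile (t : List Char) :
    (pvClean t).takeWhile (· ≠ ' ') = pvClean (t.takeWhile pvValid) := by
  induction t with
  | nil => simp [pvClean]
  | cons c t ih =>
    by_cases hv : pvValid c = true
    · have h1 : pvClean (c :: t) = c :: pvClean t := by rw [pvClean_cons, if_pos hv]
      rw [h1, List.takeWhile_cons_of_pos (by simp [pvValid_ne_space c hv]),
        List.takeWhile_cons_of_pos hv, pvClean_cons, if_pos hv, ih]
    · have hv' : pvValid c = false := by simpa using hv
      have h1 : pvClean (c :: t) = ' ' :: pvClean t := by
        rw [pvClean_cons]; simp [hv']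
      rw [h1, List.takeWhile_cons_of_neg (by simp),
        List.takeWhile_cons_of_neg (by simp [hv'])]
      simp [pvClean]

def pvMVal (l : List Char) : Int :=
  pvFMax ((pvWSplit (pvClean l)).map (fun r => (r.length : Int)))

-- core: B's two-phase value equals max(lead, rest); proved jointly with the
-- statement for the list starting at the first separator
theorem mval_spec (l : List Char) :
    pvMVal l = max (pvLead l) (pvRest l) ∧
    pvFMax ((pvWSplit ((pvClean l).dropWhile (· ≠ ' '))).map (fun r => (r.length : Int)))
      = pvRest l := by
  induction l with
  | nil => simp [pvMVal, pvClean, pvWSplit, pvFMax, pvLead, pvRest]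
  | cons c t ih =>
    obtain ⟨ihM, ihN⟩ := ih
    by_cases hv : pvValid c = true
    · have hne : c ≠ ' ' := pvValid_ne_space c hv
      have hclean : pvClean (c :: t) = c :: pvClean t := by rw [pvClean_cons, if_pos hv]
      have hrest : pvFMax ((pvWSplit ((pvClean t).dropWhile (· ≠ ' '))).map
          (fun r => (r.length : Int))) = pvRest t := ihN
      constructor
      · rw [pvMVal, hclean, pvWSplit, if_neg hne, List.map_cons, pvFMax_cons]
        rw [clean_takeWhile]
        have hlen : (((c :: pvClean (t.takeWhile pvValid)).length : Nat) : Int)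
            = 1 + pvLead t := by
          simp [pvClean, pvLead]; omega
        rw [hlen, hrest, pvLead_cons_valid c t hv]
        simp [pvRest, hv]
      · rw [hclean, List.dropWhile_cons_of_pos (by simp [hne]), hrest]
        simp [pvRest, hv]
    · have hv' : pvValid c = false := by simpa using hv
      have hclean : pvClean (c :: t) = ' ' :: pvClean t := by
        rw [pvClean_cons]; simp [hv']
      have hsplit : pvWSplit (' ' :: pvClean t) = pvWSplit (pvClean t) := by
        rw [pvWSplit, if_pos rfl]
      have key : pvFMax ((pvWSplit (' ' :: pvClean t)).map (fun r => (r.length : Int)))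
          = max (pvLead t) (pvRest t) := by
        rw [hsplit]; exact ihM
      have hl := pvLead_nonneg t
      have hr := pvRest_nonneg t
      constructor
      · rw [pvMVal, hclean, key, pvLead_cons_invalid c t hv']
        simp only [pvRest, hv', Bool.false_eq_true, if_false]
        omega
      · rw [hclean, List.dropWhile_cons_of_neg (by simp), key]
        simp [pvRest, hv']

theorem portA_eq (s : String) :
    check_len_actg s = max 0 (max (pvLead s.toList) (pvRest s.toList)) := by
  have h := foldlA_eq s.toList 0 0 le_rfl
  simp only [zero_add] at h
  show (if (s.toList.foldl pvStepA ((0:Int),(0:Int))).1 < (s.toList.foldl pvStepA ((0:Int),(0:Int))).2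
        then (s.toList.foldl pvStepA ((0:Int),(0:Int))).2
        else (s.toList.foldl pvStepA ((0:Int),(0:Int))).1)
      = max 0 (max (pvLead s.toList) (pvRest s.toList))
  rw [← h]
  split_ifs with hc
  · exact (max_eq_right (le_of_lt hc)).symm
  · exact (max_eq_left (not_lt.mp hc)).symm

theorem portB_eq (s : String) : check_len_actg_alt s = pvMVal s.toList := rfl

-- ===== VERDICT (by name: the statement is the Claim_ definition above) =====
theorem check_len_actg_spec : Claim_equal_check_len_actg := by
  intro s _
  unfold Spec_check_len_actg
  rw [portB_eq, portA_eq, (mval_spec s.toList).1]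
  exact max_eq_right (le_max_of_le_left (pvLead_nonneg s.toList))
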